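-- pv_equiv track=rewrite | github.com/kanderson666/launch | py110/py119_prep/pedac/study_w_Clare.py | anagram_difference
-- ===== SOURCE A (Python) =====
-- def anagram_difference(string1, string2):
--     # unique_set = set()
--     # for char in (string1 + string2):
--     #     unique_set.add(char)
--     # for char in string2:
--     #     unique_set.add(char)
--     my_set = set(string1 + string2)
--     total = 0
--     for char in my_set:
--         count1 = string1.count(char)
--         count2 = string2.count(char)
--         total += abs(count1-count2)
--     return total
-- ===== SOURCE B (Python) =====
-- def anagram_difference(string1, string2):
--     a = sorted(string1)
--     b = sorted(string2)
--     i = j = 0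
--     total = 0
--     while i < len(a) and j < len(b):
--         if a[i] == b[j]:
--             i += 1
--             j += 1
--         else:
--             total += 1
--             if a[i] < b[j]:
--                 i += 1
--             else:
--                 j += 1
--     return total + (len(a) - i) + (len(b) - j)
-- ===== Notes on version B (the rewrite author's own statement) =====
-- stated objective: alternative
-- what changed: B sorts both strings and counts unmatched characters in a single two-pointer merge pass instead of A's per-distinct-character counting scans over both strings.
import Mathlib
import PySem

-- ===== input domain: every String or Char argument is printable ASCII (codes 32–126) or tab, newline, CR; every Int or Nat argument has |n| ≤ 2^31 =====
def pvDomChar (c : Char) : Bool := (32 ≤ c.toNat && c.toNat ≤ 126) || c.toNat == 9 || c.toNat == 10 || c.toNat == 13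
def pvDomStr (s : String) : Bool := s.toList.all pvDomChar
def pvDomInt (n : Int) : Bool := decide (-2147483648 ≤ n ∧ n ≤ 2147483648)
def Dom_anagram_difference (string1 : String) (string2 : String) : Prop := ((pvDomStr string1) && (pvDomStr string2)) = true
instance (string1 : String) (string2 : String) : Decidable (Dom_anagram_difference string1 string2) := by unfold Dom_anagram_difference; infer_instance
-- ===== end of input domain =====

-- B replaces A's per-distinct-character counting pass with sort-both-strings + one two-pointer
-- merge pass counting unmatched characters (objective: alternative algorithm, same result).

-- ===== PORT A =====
-- A: my_set = set(string1 + string2); for char in my_set: total += abs(string1.count(char) - string2.count(char))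
-- (the sum does not depend on Python's set iteration order)
def anagram_difference (string1 : String) (string2 : String) : Int :=
  let my_set : PySem.Set Char := PySem.Set.ofList (string1.toList ++ string2.toList)
  my_set.foldl
    (fun total char =>
      let count1 : Int := (PySem.Chars.count string1.toList [char] : Int)
      let count2 : Int := (PySem.Chars.count string2.toList [char] : Int)
      total + |count1 - count2|)
    0

-- ===== PORT B =====
-- B's while-loop over the two sorted lists, as the obvious recursion on the pair (i, j advance = tails);
-- the base cases are the 'remaining tail' additions after the loop.
def mergeDiff : List Char → List Char → Int
  | [], ys => (ys.length : Int)
  | x :: xs, [] => ((x :: xs).length : Int)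
  | x :: xs, y :: ys =>
    if x = y then mergeDiff xs ys
    else if x < y then 1 + mergeDiff xs (y :: ys)
    else 1 + mergeDiff (x :: xs) ys
termination_by xs ys => xs.length + ys.length

def anagram_difference_alt (string1 : String) (string2 : String) : Int :=
  let a := PySem.List.sorted string1.toList (fun c => c) false
  let b := PySem.List.sorted string2.toList (fun c => c) false
  mergeDiff a b

-- ===== PRECONDITION & SPEC =====
def Spec_anagram_difference (string1 : String) (string2 : String) (out : Int) : Prop := out = anagram_difference_alt string1 string2
instance (string1 : String) (string2 : String) (out : Int) : Decidable (Spec_anagram_difference string1 string2 out) := by unfold Spec_anagram_difference; infer_instance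

-- ===== CLAIM (what is proved, stated in full; the proofs are below) =====
def Claim_equal_anagram_difference : Prop := ∀ (string1 : String) (string2 : String), Dom_anagram_difference string1 string2 → Spec_anagram_difference string1 string2 (anagram_difference string1 string2)

-- ===== LEMMAS AND PROOFS =====

-- the common mathematical value: sum over the distinct characters of |count₁ - count₂|
def diffSum (xs ys : List Char) : Int :=
  ∑ c ∈ (xs ++ ys).toFinset, |((xs.count c : Int)) - ((ys.count c : Int))|

-- Python str.count with a single-character needle is List.count
theorem chars_count_singleton (s : List Char) (c : Char) :
    PySem.Chars.count s [c] = s.count c := by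
  have go : ∀ (fuel : Nat) (s : List Char) (acc : Nat), s.length ≤ fuel →
      PySem.Chars.count.go [c] fuel s acc = acc + s.count c := by
    intro fuel
    induction fuel with
    | zero =>
      intro s acc h
      match s with
      | [] => simp [PySem.Chars.count.go]
    | succ n ih =>
      intro s acc h
      match s with
      | [] => simp [PySem.Chars.count.go]
      | a :: t =>
        rw [PySem.Chars.count.go]
        by_cases hc : c = a
        · subst hc
          simp only [List.isPrefixOf, BEq.rfl, Bool.and_true,
            if_pos, List.length_cons, List.length_nil, Nat.zero_add, List.drop_succ_cons,
            List.drop_zero]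
          rw [ih t (acc + 1) (by simpa using h)]
          simp
          omega
        · have hpre : [c].isPrefixOf (a :: t) = false := by
            simp [List.isPrefixOf, hc]
          rw [hpre]
          simp only [Bool.false_eq_true, if_false]
          rw [ih t acc (by simpa using h)]
          simp [Ne.symm hc]
  unfold PySem.Chars.count
  simp only [List.isEmpty_cons, Bool.false_eq_true, if_false]
  rw [go s.length s 0 le_rfl]
  omega

theorem A_eq_diffSum (s1 s2 : String) :
    anagram_difference s1 s2 = diffSum s1.toList s2.toList := by
  unfold anagram_difference
  simp only [chars_count_singleton]
  rw [PySem.List.foldl_add _ (fun c => |((s1.toList.count c : Int)) - ((s2.toList.count c : Int))|) 0]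
  rw [zero_add]
  have hnd := PySem.Set.nodup_ofList (s1.toList ++ s2.toList)
  have hfin : (PySem.Set.ofList (s1.toList ++ s2.toList)).toFinset
      = (s1.toList ++ s2.toList).toFinset := by
    ext c; simp [PySem.Set.mem_ofList]
  rw [← List.sum_toFinset _ hnd, hfin]
  rfl

theorem diffSum_nil_left (ys : List Char) : diffSum [] ys = (ys.length : Int) := by
  unfold diffSum
  simp only [List.nil_append, List.count_nil, Nat.cast_zero, zero_sub, abs_neg, abs_of_nonneg (Int.natCast_nonneg _)]
  rw [← Nat.cast_sum]
  exact congrArg _ (List.sum_toFinset_count_eq_length ys)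

theorem diffSum_comm (xs ys : List Char) : diffSum xs ys = diffSum ys xs := by
  unfold diffSum
  rw [show (xs ++ ys).toFinset = (ys ++ xs).toFinset by
    ext c; simp; tauto]
  exact Finset.sum_congr rfl fun c _ => abs_sub_comm _ _

theorem diffSum_nil_right (xs : List Char) : diffSum xs [] = (xs.length : Int) := by
  rw [diffSum_comm]; exact diffSum_nil_left xs

theorem diffSum_cons_cons (x : Char) (xs ys : List Char) :
    diffSum (x :: xs) (x :: ys) = diffSum xs ys := by
  unfold diffSum
  have hfin : ((x :: xs) ++ x :: ys).toFinset = insert x ((xs ++ ys).toFinset) := by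
    ext c; simp
  rw [hfin]
  have hterm : ∀ c ∈ insert x ((xs ++ ys).toFinset),
      |(((x :: xs).count c : Int)) - (((x :: ys).count c : Int))|
        = |((xs.count c : Int)) - ((ys.count c : Int))| := by
    intro c _
    by_cases hc : x = c
    · subst hc
      simp only [List.count_cons_self]
      push_cast
      congr 1
      ring
    · simp [List.count_cons_of_ne hc]
  rw [Finset.sum_congr rfl hterm]
  refine Finset.sum_insert_of_eq_zero_if_notMem ?_
  intro hx
  have hx1 : xs.count x = 0 := List.count_eq_zero.mpr (by intro h; exact hx (by simp [h]))
  have hx2 : ys.count x = 0 := List.count_eq_zero.mpr (by intro h; exact hx (by simp [h]))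
  simp [hx1, hx2]

theorem diffSum_cons_left (x : Char) (xs ys : List Char) (h : ys.count x = 0) :
    diffSum (x :: xs) ys = 1 + diffSum xs ys := by
  unfold diffSum
  have hfin : ((x :: xs) ++ ys).toFinset = insert x ((xs ++ ys).toFinset) := by
    ext c; simp
  rw [hfin]
  set f : Char → Int := fun c => |((xs.count c : Int)) - ((ys.count c : Int))| with hf
  have hmem : x ∈ insert x ((xs ++ ys).toFinset) := Finset.mem_insert_self _ _
  have hL : ∑ c ∈ insert x ((xs ++ ys).toFinset),
      |(((x :: xs).count c : Int)) - ((ys.count c : Int))|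
      = |(((x :: xs).count x : Int)) - ((ys.count x : Int))|
        + ∑ c ∈ ((xs ++ ys).toFinset).erase x,
            |(((x :: xs).count c : Int)) - ((ys.count c : Int))| := by
    rw [← Finset.add_sum_erase _ _ hmem, Finset.erase_insert_eq_erase]
  have hR : ∑ c ∈ (xs ++ ys).toFinset, f c
      = f x + ∑ c ∈ ((xs ++ ys).toFinset).erase x, f c := by
    rw [← Finset.sum_insert_of_eq_zero_if_notMem (f := f) (s := (xs ++ ys).toFinset) (a := x) ?_,
        ← Finset.add_sum_erase _ _ hmem, Finset.erase_insert_eq_erase]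
    intro hx
    have hx1 : xs.count x = 0 := List.count_eq_zero.mpr (by intro hh; exact hx (by simp [hh]))
    have hx2 : ys.count x = 0 := List.count_eq_zero.mpr (by intro hh; exact hx (by simp [hh]))
    simp [hf, hx1, hx2]
  have htail : ∀ c ∈ ((xs ++ ys).toFinset).erase x,
      |(((x :: xs).count c : Int)) - ((ys.count c : Int))| = f c := by
    intro c hc
    have hne : x ≠ c := fun he => (Finset.mem_erase.mp hc).1 (he ▸ rfl)
    simp [hf, List.count_cons_of_ne hne]
  have hhead : |(((x :: xs).count x : Int)) - ((ys.count x : Int))| = 1 + f x := by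
    simp only [List.count_cons_self, h, Nat.cast_zero, sub_zero, hf]
    push_cast
    rw [abs_of_nonneg (by positivity), abs_of_nonneg (by positivity)]
    ring
  rw [hL, Finset.sum_congr rfl htail, hhead, hR]
  ring

theorem diffSum_cons_right (y : Char) (xs ys : List Char) (h : xs.count y = 0) :
    diffSum xs (y :: ys) = 1 + diffSum xs ys := by
  rw [diffSum_comm, diffSum_cons_left y ys xs h, diffSum_comm ys xs]

theorem mergeDiff_eq_diffSum : ∀ (n : Nat) (xs ys : List Char),
    xs.length + ys.length ≤ n →
    xs.Pairwise (· ≤ ·) → ys.Pairwise (· ≤ ·) →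
    mergeDiff xs ys = diffSum xs ys := by
  intro n
  induction n with
  | zero =>
    intro xs ys h _ _
    cases xs <;> cases ys <;> simp_all [mergeDiff, diffSum]
  | succ n ih =>
    intro xs ys h hx hy
    match xs, ys with
    | [], ys => rw [diffSum_nil_left]; simp [mergeDiff]
    | x :: xs, [] => rw [diffSum_nil_right]; simp [mergeDiff]
    | x :: xs, y :: ys =>
      rw [mergeDiff]
      have hx' := (List.pairwise_cons.mp hx).2
      have hy' := (List.pairwise_cons.mp hy).2
      by_cases hxy : x = y
      · subst hxy
        rw [if_pos rfl, diffSum_cons_cons,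
          ih xs ys (by simp at h ⊢; omega) hx' hy']
      · rw [if_neg hxy]
        by_cases hlt : x < y
        · rw [if_pos hlt]
          have hcnt : (y :: ys).count x = 0 := by
            refine List.count_eq_zero.mpr ?_
            intro hmem
            rcases List.mem_cons.mp hmem with he | hm
            · exact absurd he.symm (ne_of_gt hlt)
            · exact absurd rfl (ne_of_gt (lt_of_lt_of_le hlt
                ((List.pairwise_cons.mp hy).1 x hm)))
          rw [diffSum_cons_left x xs (y :: ys) hcnt,
            ih xs (y :: ys) (by simp at h ⊢; omega) hx' hy]
        · rw [if_neg hlt]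
          have hyx : y < x := lt_of_le_of_ne (not_lt.mp hlt) (Ne.symm hxy)
          have hcnt : (x :: xs).count y = 0 := by
            refine List.count_eq_zero.mpr ?_
            intro hmem
            rcases List.mem_cons.mp hmem with he | hm
            · exact absurd he.symm (ne_of_gt hyx)
            · exact absurd rfl (ne_of_gt (lt_of_lt_of_le hyx
                ((List.pairwise_cons.mp hx).1 y hm)))
          rw [diffSum_cons_right y (x :: xs) ys hcnt,
            ih (x :: xs) ys (by simp at h ⊢; omega) hx hy']

theorem diffSum_perm {xs xs' ys ys' : List Char} (h1 : xs.Perm xs') (h2 : ys.Perm ys') :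
    diffSum xs ys = diffSum xs' ys' := by
  unfold diffSum
  rw [show (xs ++ ys).toFinset = (xs' ++ ys').toFinset by
    ext c; simp [h1.mem_iff, h2.mem_iff]]
  exact Finset.sum_congr rfl fun c _ => by rw [h1.count_eq, h2.count_eq]

theorem alt_eq_diffSum (s1 s2 : String) :
    anagram_difference_alt s1 s2 = diffSum s1.toList s2.toList := by
  unfold anagram_difference_alt
  rw [mergeDiff_eq_diffSum
      ((PySem.List.sorted s1.toList (fun c => c) false).length
        + (PySem.List.sorted s2.toList (fun c => c) false).length)
      _ _ le_rfl
      (PySem.List.sorted_pairwise s1.toList (fun c => c))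
      (PySem.List.sorted_pairwise s2.toList (fun c => c))]
  exact diffSum_perm (PySem.List.sorted_perm _ _ _) (PySem.List.sorted_perm _ _ _)

-- ===== VERDICT (by name: the statement is the Claim_ definition above) =====
theorem anagram_difference_spec : Claim_equal_anagram_difference := by
  intro s1 s2 _
  unfold Spec_anagram_difference
  rw [A_eq_diffSum, alt_eq_diffSum]
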